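-- pv_equiv track=rewrite | github.com/kaluginpeter/Algorithms_and_structures_tasks | CodeWars/5kyu/The_Primes_as_a_Result_of_the_Longest_Consecutive_Sum_I.py | prime_maxlength_chain
-- ===== SOURCE A (Python) =====
-- def prime_maxlength_chain(n):
--     sieve = [True] * n
--     sieve[0] = sieve[1] = False
--     for i in range(2, int(n**0.5) + 1):
--         if sieve[i]:
--             for j in range(i*i, n, i): sieve[j] = False
--     primes = [i for i in range(2, n) if sieve[i]]
--     prefix = [0]
--     for p in primes: prefix.append(prefix[-1] + p)
--     max_len = 0
--     result = []
--     total_primes = len(primes)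
--     for length in range(total_primes, 0, -1):
--         found = []
--         for i in range(total_primes - length + 1):
--             s = prefix[i + length] - prefix[i]
--             if s >= n: break
--             if sieve[s]: found.append(s)
--         if found: return sorted(found)
--     return []
-- ===== SOURCE B (Python) =====
-- def prime_maxlength_chain(n):
--     # Same sieve / prime list, but a single ascending sweep over start indices with a
--     # running sum, tracking the best window length instead of scanning lengths descending.
--     sieve = [True] * n
--     sieve[0] = sieve[1] = False
--     for i in range(2, int(n**0.5) + 1):
--         if sieve[i]:
--             for j in range(i*i, n, i): sieve[j] = False
--     primes = [i for i in range(2, n) if sieve[i]]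
--     t = len(primes)
--     best_len = 0
--     best = []
--     for i in range(t):
--         s = 0
--         for j in range(i, t):
--             s += primes[j]
--             if s >= n: break
--             if sieve[s]:
--                 length = j - i + 1
--                 if length > best_len:
--                     best_len = length
--                     best = [s]
--                 elif length == best_len:
--                     best.append(s)
--     return sorted(best)
-- ===== Notes on version B (the rewrite author's own statement) =====
-- stated objective: alternative
-- what changed: A scans window lengths in descending order, rebuilding a prefix-sum array scan for every length and returning at the first length with a hit; B makes a single ascending sweep over start indices with a running consecutive-prime sum, tracking the best window length and collecting the sums that attain it.
import Mathlib
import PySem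

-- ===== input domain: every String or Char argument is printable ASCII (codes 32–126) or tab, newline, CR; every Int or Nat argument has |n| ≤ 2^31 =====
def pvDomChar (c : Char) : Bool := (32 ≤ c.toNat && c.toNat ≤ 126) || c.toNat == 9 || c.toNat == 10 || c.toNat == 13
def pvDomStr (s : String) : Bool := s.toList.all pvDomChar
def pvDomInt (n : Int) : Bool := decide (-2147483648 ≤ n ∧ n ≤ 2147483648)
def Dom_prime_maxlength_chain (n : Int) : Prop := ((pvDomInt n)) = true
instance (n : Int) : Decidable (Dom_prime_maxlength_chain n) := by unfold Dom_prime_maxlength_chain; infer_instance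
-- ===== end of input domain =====

-- B replaces A's descending scan over window lengths by a single ascending sweep over
-- start indices with a running sum, tracking the best window length (alternative decomposition).


-- ===== PORT A =====
-- Both Pythons share the same sieve/prime-list lines, so both ports call these helpers.
-- int(n**0.5) = Nat.sqrt n.toNat : exact for 2 ≤ n ≤ 2^31 (the float sqrt error is far below the gap to the nearest integer).
-- the Python list of booleans is array-backed: Array Bool with O(1) reads/writes is its
-- faithful representation; all indices read/written are nonnegative and in range for n ≥ 2.
def pvSieve (n : Int) : Array Bool :=
  let sv := ((Array.replicate n.toNat true).setIfInBounds 0 false).setIfInBounds 1 false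
  (PySem.List.pyRange 2 ((Nat.sqrt n.toNat : Int) + 1) 1).foldl
    (fun sv i =>
      if sv.getD i.toNat false then
        (PySem.List.pyRange (i * i) n i).foldl (fun sv j => sv.setIfInBounds j.toNat false) sv
      else sv) sv

def pvPrimes (n : Int) (sv : Array Bool) : List Int :=
  (PySem.List.pyRange 2 n 1).filter (fun i => sv.getD i.toNat false)

-- prefix = [0]; for p in primes: prefix.append(prefix[-1] + p)
def pvPrefix (ps : List Int) : Array Int :=
  ps.foldl (fun pre p => pre.push (pre.getD (pre.size - 1) 0 + p)) #[0]

-- inner loop: for i in range(total-length+1): s = prefix[i+length]-prefix[i]; break / append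
def pvInnerA (sv : Array Bool) (pre : Array Int) (n : Int) (L : Nat) :
    Nat → Nat → List Int → List Int
  | 0, _, acc => acc
  | rem + 1, i, acc =>
    let s := pre.getD (i + L) 0 - pre.getD i 0
    if s ≥ n then acc
    else if sv.getD s.toNat false then pvInnerA sv pre n L rem (i + 1) (acc ++ [s])
    else pvInnerA sv pre n L rem (i + 1) acc

-- outer loop: for length in range(total_primes, 0, -1): ... ; return []
def pvOuterA (sv : Array Bool) (pre : Array Int) (n : Int) (T : Nat) : Nat → List Int
  | 0 => []
  | L + 1 =>
    let found := pvInnerA sv pre n (L + 1) (T - (L + 1) + 1) 0 []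
    if found.isEmpty then pvOuterA sv pre n T L
    else PySem.List.sorted found (fun x => x) false

def prime_maxlength_chain (n : Int) : List Int :=
  let sv := pvSieve n
  let ps := pvPrimes n sv
  let pre := pvPrefix ps
  pvOuterA sv pre n ps.length ps.length

-- ===== PORT B =====
-- inner loop of B: for j in range(i, t): s += primes[j]; break / update (best_len, best);
-- primes, a Python list, is array-backed: pa : Array Int, so primes[j] is pa.getD (O(1), in range)
def pvInnerB (sv : Array Bool) (pa : Array Int) (n : Int) (i : Nat) :
    Nat → Nat → Int → Nat × List Int → Nat × List Int
  | 0, _, _, st => st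
  | rem + 1, j, s, st =>
    let s' := s + pa.getD j 0
    if s' ≥ n then st
    else
      let st' :=
        if sv.getD s'.toNat false then
          let len := j - i + 1
          if len > st.1 then (len, [s'])
          else if len = st.1 then (st.1, st.2 ++ [s'])
          else st
        else st
      pvInnerB sv pa n i rem (j + 1) s' st'

-- outer loop of B: for i in range(t): ...
def pvOuterB (sv : Array Bool) (pa : Array Int) (n : Int) :
    Nat → Nat → Nat × List Int → Nat × List Int
  | 0, _, st => st
  | rem + 1, i, st => pvOuterB sv pa n rem (i + 1) (pvInnerB sv pa n i (pa.size - i) i 0 st)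

def prime_maxlength_chain_alt (n : Int) : List Int :=
  let sv := pvSieve n
  let pa := (pvPrimes n sv).toArray
  PySem.List.sorted (pvOuterB sv pa n pa.size 0 (0, [])).2 (fun x => x) false

-- ===== PRECONDITION & SPEC =====
-- Pre_ excludes exactly n < 2, where the Python A (and B) raises IndexError on sieve[0]/sieve[1].
def Pre_prime_maxlength_chain (n : Int) : Prop := 2 ≤ n
instance (n : Int) : Decidable (Pre_prime_maxlength_chain n) := by
  unfold Pre_prime_maxlength_chain; infer_instance

def pvWitness_prime_maxlength_chain : Int := 10

def Spec_prime_maxlength_chain (n : Int) (out : List Int) : Prop := out = prime_maxlength_chain_alt n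
instance (n : Int) (out : List Int) : Decidable (Spec_prime_maxlength_chain n out) := by
  unfold Spec_prime_maxlength_chain; infer_instance

-- ===== CLAIM (what is proved, stated in full; the proofs are below) =====
def Claim_equal_prime_maxlength_chain : Prop := ∀ (n : Int), Dom_prime_maxlength_chain n → Pre_prime_maxlength_chain n → Spec_prime_maxlength_chain n (prime_maxlength_chain n)

-- ===== LEMMAS AND PROOFS =====

-- Pk k = sum of the first k primes; W i L = sum of the length-L window starting at i.
def pvPk (ps : List Int) (k : Nat) : Int := (ps.take k).sum
def pvW (ps : List Int) (i L : Nat) : Int := pvPk ps (i + L) - pvPk ps i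
-- pvQ sv s = "sieve[s]", the primality lookup both programs apply to a window sum.
def pvQ (sv : Array Bool) (s : Int) : Bool := sv.getD s.toNat false
-- a window (i, L) counts iff it is in range, its sum is < n and the sum is prime.
def pvGoodB (sv : Array Bool) (ps : List Int) (n : Int) (i L : Nat) : Bool :=
  decide (1 ≤ L) && decide (i + L ≤ ps.length) && decide (pvW ps i L < n) && pvQ sv (pvW ps i L)
-- all good window sums of length bl with start < k, in start order.
def pvCollect (sv : Array Bool) (ps : List Int) (n : Int) (k bl : Nat) : List Int :=
  (List.range k).filterMap (fun i => if pvGoodB sv ps n i bl then some (pvW ps i bl) else none)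
-- loop invariant of B's outer loop after the starts < k have been processed.
def pvInv (sv : Array Bool) (ps : List Int) (n : Int) (k : Nat) (st : Nat × List Int) : Prop :=
  (∀ i L, i < k → pvGoodB sv ps n i L = true → L ≤ st.1) ∧
  (st.1 = 0 ∨ ∃ i, i < k ∧ pvGoodB sv ps n i st.1 = true) ∧
  st.2 = pvCollect sv ps n k st.1
-- invariant inside B's inner loop at start i, lengths ≤ l processed.
def pvInv2 (sv : Array Bool) (ps : List Int) (n : Int) (i l : Nat) (st : Nat × List Int) : Prop :=
  (∀ i' L, (i' < i ∨ (i' = i ∧ L ≤ l)) → pvGoodB sv ps n i' L = true → L ≤ st.1) ∧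
  (st.1 = 0 ∨ (∃ i', i' < i ∧ pvGoodB sv ps n i' st.1 = true) ∨
    (pvGoodB sv ps n i st.1 = true ∧ st.1 ≤ l)) ∧
  st.2 = pvCollect sv ps n i st.1 ++
    (if pvGoodB sv ps n i st.1 = true ∧ st.1 ≤ l then [pvW ps i st.1] else [])

lemma pvPk_succ (ps : List Int) (k : Nat) (h : k < ps.length) :
    pvPk ps (k + 1) = pvPk ps k + ps.getD k 0 := by
  rw [pvPk, pvPk, List.take_add_one, List.sum_append, List.getElem?_eq_getElem h,
    List.getD_eq_getElem _ _ h]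
  simp

lemma pvPk_mono (ps : List Int) (hpos : ∀ p ∈ ps, 0 < p) {k k' : Nat} (h : k ≤ k') :
    pvPk ps k ≤ pvPk ps k' := by
  have hs := List.sum_take_add_sum_drop (ps.take k') k
  rw [List.take_take, min_eq_left h] at hs
  have h2 : 0 ≤ ((ps.take k').drop k).sum := by
    apply List.sum_nonneg
    intro x hx
    exact le_of_lt (hpos x (List.mem_of_mem_take (List.mem_of_mem_drop hx)))
  unfold pvPk
  omega

lemma pvW_succ (ps : List Int) (i L : Nat) (h : i + L < ps.length) :
    pvW ps i (L + 1) = pvW ps i L + ps.getD (i + L) 0 := by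
  unfold pvW
  rw [show i + (L + 1) = (i + L) + 1 by omega, pvPk_succ _ _ h]
  ring

lemma pvW_mono_len (ps : List Int) (hpos : ∀ p ∈ ps, 0 < p) (i : Nat) {L L' : Nat} (h : L ≤ L') :
    pvW ps i L ≤ pvW ps i L' := by
  have := pvPk_mono ps hpos (show i + L ≤ i + L' by omega)
  unfold pvW; omega

lemma pvW_step (ps : List Int)
    (hmono : ∀ a b : Nat, a < b → b < ps.length → ps.getD a 0 < ps.getD b 0)
    {i L : Nat} (h2 : i + 1 + L ≤ ps.length) (hL : 1 ≤ L) :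
    pvW ps i L ≤ pvW ps (i + 1) L := by
  have ha : i + L < ps.length := by omega
  have hb : i < ps.length := by omega
  have e1 := pvPk_succ ps (i + L) ha
  have e2 := pvPk_succ ps i hb
  have h3 : ps.getD i 0 < ps.getD (i + L) 0 := hmono i (i + L) (by omega) ha
  unfold pvW
  rw [show i + 1 + L = (i + L) + 1 by omega] at *
  omega

lemma pvW_mono_start (ps : List Int)
    (hmono : ∀ a b : Nat, a < b → b < ps.length → ps.getD a 0 < ps.getD b 0)
    {i i' L : Nat} (h1 : i ≤ i') (h2 : i' + L ≤ ps.length) (hL : 1 ≤ L) :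
    pvW ps i L ≤ pvW ps i' L := by
  induction i' with
  | zero =>
    have : i = 0 := by omega
    subst this; exact le_refl _
  | succ m ih =>
    rcases Nat.lt_or_ge i (m + 1) with hlt | hge
    · have him : i ≤ m := by omega
      calc pvW ps i L ≤ pvW ps m L := ih him (by omega)
        _ ≤ pvW ps (m + 1) L := pvW_step ps hmono h2 hL
    · have : i = m + 1 := by omega
      subst this; exact le_refl _

lemma pvPrefix_aux (l : List Int) : ∀ (acc : Array Int) (c : Int),
    (List.foldl (fun pre p => pre.push (pre.getD (pre.size - 1) 0 + p)) (acc.push c) l).toList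
      = acc.toList ++ List.scanl (· + ·) c l := by
  induction l with
  | nil =>
    intro acc c
    simp [Array.toList_push]
  | cons p t ih =>
    intro acc c
    have hlast : (acc.push c).getD ((acc.push c).size - 1) 0 = c := by
      simp [Array.getD]
    simp only [List.foldl_cons, hlast, List.scanl_cons]
    rw [ih (acc.push c) (c + p)]
    simp [Array.toList_push]

lemma pvScanl_getD (l : List Int) : ∀ (c : Int) (k : Nat), k ≤ l.length →
    (List.scanl (· + ·) c l).getD k 0 = c + pvPk l k := by
  induction l with
  | nil =>
    intro c k h
    have : k = 0 := by simpa using h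
    subst this
    simp [pvPk]
  | cons a t ih =>
    intro c k h
    cases k with
    | zero => simp [pvPk]
    | succ k =>
      simp only [List.scanl_cons, List.getD_cons_succ]
      rw [ih (c + a) k (by simpa using h)]
      simp [pvPk, add_assoc]

lemma pvPrefix_getD (ps : List Int) (k : Nat) (h : k ≤ ps.length) :
    (pvPrefix ps).getD k 0 = pvPk ps k := by
  have haux := pvPrefix_aux ps #[] 0
  simp only [List.nil_append] at haux
  have hlist : (pvPrefix ps).toList = List.scanl (· + ·) 0 ps := by
    unfold pvPrefix
    exact haux
  have hsize : (pvPrefix ps).size = ps.length + 1 := by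
    rw [← Array.length_toList, hlist, List.length_scanl]
  have hk : k < (pvPrefix ps).size := by omega
  rw [show (pvPrefix ps).getD k 0 = (pvPrefix ps).toList[k] by simp [Array.getD, hk]]
  rw [← List.getD_eq_getElem _ 0 (by rw [hlist, List.length_scanl]; omega), hlist,
    pvScanl_getD ps 0 k h]
  ring

lemma pvGoodB_iff {sv : Array Bool} {ps : List Int} {n : Int} {i L : Nat} :
    pvGoodB sv ps n i L = true ↔
      1 ≤ L ∧ i + L ≤ ps.length ∧ pvW ps i L < n ∧ pvQ sv (pvW ps i L) = true := by
  simp [pvGoodB, and_assoc]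

lemma pvCollect_zero (sv : Array Bool) (ps : List Int) (n : Int) (k : Nat) :
    pvCollect sv ps n k 0 = [] := by
  simp [pvCollect, pvGoodB]

lemma pvCollect_succ (sv : Array Bool) (ps : List Int) (n : Int) (k bl : Nat) :
    pvCollect sv ps n (k + 1) bl =
      pvCollect sv ps n k bl ++ (if pvGoodB sv ps n k bl then [pvW ps k bl] else []) := by
  rw [pvCollect, List.range_succ, List.filterMap_append, pvCollect]
  congr 1
  by_cases h : pvGoodB sv ps n k bl <;> simp [h]

lemma pvCollect_eq_nil (sv : Array Bool) (ps : List Int) (n : Int) {k bl : Nat}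
    (h : ∀ i, i < k → ¬ pvGoodB sv ps n i bl = true) :
    pvCollect sv ps n k bl = [] := by
  rw [pvCollect, List.filterMap_eq_nil_iff]
  intro x hx
  simp only [List.mem_range] at hx
  simp [h x hx]

lemma pvCollect_ne_nil (sv : Array Bool) (ps : List Int) (n : Int) {k bl i : Nat}
    (h : i < k) (hg : pvGoodB sv ps n i bl = true) :
    pvCollect sv ps n k bl ≠ [] := by
  intro hnil
  rw [pvCollect, List.filterMap_eq_nil_iff] at hnil
  have := hnil i (List.mem_range.mpr h)
  simp [hg] at this

lemma pvInnerA_char (sv : Array Bool) (ps : List Int) (n : Int)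
    (hmono : ∀ a b : Nat, a < b → b < ps.length → ps.getD a 0 < ps.getD b 0)
    (L : Nat) (hL : 1 ≤ L) :
    ∀ rem i acc, i + rem + L = ps.length + 1 →
      pvInnerA sv (pvPrefix ps) n L rem i acc =
        acc ++ (List.range rem).filterMap (fun k =>
          if decide (pvW ps (i + k) L < n) && pvQ sv (pvW ps (i + k) L) then
            some (pvW ps (i + k) L) else none) := by
  intro rem
  induction rem with
  | zero =>
    intro i acc h
    simp [pvInnerA]
  | succ rem ih =>
    intro i acc h
    have hiL : i + L ≤ ps.length := by omega
    have hs : (pvPrefix ps).getD (i + L) 0 - (pvPrefix ps).getD i 0 = pvW ps i L := by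
      rw [pvPrefix_getD ps _ hiL, pvPrefix_getD ps _ (by omega : i ≤ ps.length)]
      rfl
    simp only [pvInnerA]
    rw [hs]
    by_cases hge : pvW ps i L ≥ n
    · rw [if_pos hge]
      have hnone : ∀ x ∈ List.range (rem + 1),
          (fun k => if decide (pvW ps (i + k) L < n) && pvQ sv (pvW ps (i + k) L) then
            some (pvW ps (i + k) L) else none) x = none := by
        intro x hx
        simp only [List.mem_range] at hx
        have hmle : pvW ps i L ≤ pvW ps (i + x) L :=
          pvW_mono_start ps hmono (Nat.le_add_right i x) (by omega) hL
        have : ¬ pvW ps (i + x) L < n := by omega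
        simp [this]
      rw [List.filterMap_eq_nil_iff.mpr hnone, List.append_nil]
    · rw [if_neg hge]
      have hlt : pvW ps i L < n := by omega
      have hshift : ∀ (acc' : List Int),
          acc' ++ (List.range rem).filterMap (fun k =>
            if decide (pvW ps (i + 1 + k) L < n) && pvQ sv (pvW ps (i + 1 + k) L) then
              some (pvW ps (i + 1 + k) L) else none)
          = acc' ++ (List.range rem).filterMap ((fun k =>
            if decide (pvW ps (i + k) L < n) && pvQ sv (pvW ps (i + k) L) then
              some (pvW ps (i + k) L) else none) ∘ (· + 1)) := by
        intro acc'
        congr 1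
        apply List.filterMap_congr
        intro x _
        simp only [Function.comp]
        rw [show i + (x + 1) = i + 1 + x by omega]
      by_cases hq : pvQ sv (pvW ps i L)
      · have hq' : sv.getD (pvW ps i L).toNat false = true := hq
        rw [if_pos (by simpa using hq')]
        rw [ih (i + 1) (acc ++ [pvW ps i L]) (by omega), hshift]
        rw [List.range_succ_eq_map, List.filterMap_cons, List.filterMap_map]
        have h0 : (if decide (pvW ps (i + 0) L < n) && pvQ sv (pvW ps (i + 0) L) then
            some (pvW ps (i + 0) L) else none) = some (pvW ps i L) := by
          simp [hlt, hq]
        rw [h0]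
        simp
      · have hq' : sv.getD (pvW ps i L).toNat false = false :=
          (Bool.not_eq_true _).mp hq
        rw [if_neg (by simp [hq'])]
        rw [ih (i + 1) acc (by omega), hshift]
        rw [List.range_succ_eq_map, List.filterMap_cons, List.filterMap_map]
        have h0 : (if decide (pvW ps (i + 0) L < n) && pvQ sv (pvW ps (i + 0) L) then
            some (pvW ps (i + 0) L) else none) = none := by
          simp [hlt, hq]
        rw [h0]

lemma pvInnerA_eq_collect (sv : Array Bool) (ps : List Int) (n : Int)
    (hmono : ∀ a b : Nat, a < b → b < ps.length → ps.getD a 0 < ps.getD b 0)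
    (L : Nat) (hL : 1 ≤ L) (hLT : L ≤ ps.length) :
    pvInnerA sv (pvPrefix ps) n L (ps.length - L + 1) 0 [] = pvCollect sv ps n ps.length L := by
  rw [pvInnerA_char sv ps n hmono L hL _ 0 [] (by omega), List.nil_append, pvCollect]
  have hT : ps.length = (ps.length - L + 1) + (L - 1) := by omega
  conv_rhs => rw [hT, List.range_add, List.filterMap_append, List.filterMap_map]
  have h2 : (List.range (L - 1)).filterMap
      ((fun i => if pvGoodB sv ps n i L then some (pvW ps i L) else none) ∘
        (fun x => ps.length - L + 1 + x)) = [] := by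
    apply List.filterMap_eq_nil_iff.mpr
    intro x _
    have hgt : ¬ (ps.length - L + 1 + x + L ≤ ps.length) := by omega
    simp [Function.comp, pvGoodB, hgt]
  rw [h2, List.append_nil]
  apply List.filterMap_congr
  intro x hx
  simp only [List.mem_range] at hx
  have hx2 : x + L ≤ ps.length := by omega
  simp [pvGoodB, hL, hx2]

lemma pvInv2_zero (sv : Array Bool) (ps : List Int) (n : Int) (i : Nat) (st : Nat × List Int)
    (h : pvInv sv ps n i st) : pvInv2 sv ps n i 0 st := by
  obtain ⟨h1, h2, h3⟩ := h
  refine ⟨?_, ?_, ?_⟩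
  · rintro i' L (hlt | ⟨rfl, hL0⟩) hg
    · exact h1 i' L hlt hg
    · have : L = 0 := by omega
      subst this
      simp [pvGoodB] at hg
  · rcases h2 with h0 | ⟨i0, hi0, hg⟩
    · exact Or.inl h0
    · exact Or.inr (Or.inl ⟨i0, hi0, hg⟩)
  · rw [h3]
    have hno : ¬ (pvGoodB sv ps n i st.1 = true ∧ st.1 ≤ 0) := by
      rintro ⟨hg, hle⟩
      have : st.1 = 0 := by omega
      rw [this] at hg
      simp [pvGoodB] at hg
    rw [if_neg hno, List.append_nil]

lemma pvInv2_finish (sv : Array Bool) (ps : List Int) (n : Int) (i : Nat) (st : Nat × List Int)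
    (h : pvInv2 sv ps n i (ps.length - i) st) : pvInv sv ps n (i + 1) st := by
  obtain ⟨h1, h2, h3⟩ := h
  refine ⟨?_, ?_, ?_⟩
  · intro i' L hlt hg
    rcases Nat.lt_or_ge i' i with hi | hi
    · exact h1 i' L (Or.inl hi) hg
    · have hie : i' = i := by omega
      subst hie
      have hle : L ≤ ps.length - i' := by
        have := (pvGoodB_iff.mp hg).2.1
        omega
      exact h1 i' L (Or.inr ⟨rfl, hle⟩) hg
  · rcases h2 with h0 | ⟨i', hi', hg⟩ | ⟨hg, _⟩
    · exact Or.inl h0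
    · exact Or.inr ⟨i', by omega, hg⟩
    · exact Or.inr ⟨i, by omega, hg⟩
  · rw [h3, pvCollect_succ]
    congr 1
    by_cases hg : pvGoodB sv ps n i st.1 = true
    · have hle : st.1 ≤ ps.length - i := by
        have := (pvGoodB_iff.mp hg).2.1
        omega
      rw [if_pos ⟨hg, hle⟩, if_pos hg]
    · rw [if_neg (by tauto), if_neg (by simpa using hg)]

lemma pvInv2_break (sv : Array Bool) (ps : List Int) (n : Int) (i l : Nat) (st : Nat × List Int)
    (hb : ∀ L, l < L → i + L ≤ ps.length → ¬ pvW ps i L < n)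
    (h : pvInv2 sv ps n i l st) : pvInv sv ps n (i + 1) st := by
  obtain ⟨h1, h2, h3⟩ := h
  refine ⟨?_, ?_, ?_⟩
  · intro i' L hlt hg
    rcases Nat.lt_or_ge i' i with hi | hi
    · exact h1 i' L (Or.inl hi) hg
    · have hie : i' = i := by omega
      subst hie
      rcases Or.symm (Nat.lt_or_ge l L) with hle | hgt
      · exact h1 i' L (Or.inr ⟨rfl, hle⟩) hg
      · obtain ⟨_, hlen, hWlt, _⟩ := pvGoodB_iff.mp hg
        exact absurd hWlt (hb L hgt hlen)
  · rcases h2 with h0 | ⟨i', hi', hg⟩ | ⟨hg, _⟩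
    · exact Or.inl h0
    · exact Or.inr ⟨i', by omega, hg⟩
    · exact Or.inr ⟨i, by omega, hg⟩
  · rw [h3, pvCollect_succ]
    congr 1
    by_cases hg : pvGoodB sv ps n i st.1 = true
    · have hle : st.1 ≤ l := by
        by_contra hgt
        obtain ⟨_, hlen, hWlt, _⟩ := pvGoodB_iff.mp hg
        exact (hb st.1 (by omega) hlen) hWlt
      rw [if_pos ⟨hg, hle⟩, if_pos hg]
    · rw [if_neg (by tauto), if_neg (by simpa using hg)]

lemma pvInv2_step (sv : Array Bool) (ps : List Int) (n : Int) (i l : Nat) (st : Nat × List Int)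
    (hfeas : i + (l + 1) ≤ ps.length) (hW : pvW ps i (l + 1) < n)
    (h : pvInv2 sv ps n i l st) :
    pvInv2 sv ps n i (l + 1)
      (if pvQ sv (pvW ps i (l + 1)) then
        (if l + 1 > st.1 then (l + 1, [pvW ps i (l + 1)])
         else if l + 1 = st.1 then (st.1, st.2 ++ [pvW ps i (l + 1)])
         else st)
       else st) := by
  obtain ⟨h1, h2, h3⟩ := h
  have hgood : pvQ sv (pvW ps i (l + 1)) = true → pvGoodB sv ps n i (l + 1) = true := by
    intro hq
    exact pvGoodB_iff.mpr ⟨by omega, hfeas, hW, hq⟩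
  by_cases hq : pvQ sv (pvW ps i (l + 1)) = true
  · rw [if_pos hq]
    by_cases hgt : l + 1 > st.1
    · rw [if_pos hgt]
      refine ⟨?_, ?_, ?_⟩
      · rintro i' L (hi | ⟨rfl, hL⟩) hg
        · have := h1 i' L (Or.inl hi) hg
          simp only
          omega
        · simpa using hL
      · exact Or.inr (Or.inr ⟨hgood hq, le_refl _⟩)
      · have hnil : pvCollect sv ps n i (l + 1) = [] := by
          apply pvCollect_eq_nil
          intro i' hi' hg
          have := h1 i' (l + 1) (Or.inl hi') hg
          omega
        simp only [hnil, List.nil_append]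
        rw [if_pos ⟨hgood hq, le_refl _⟩]
    · rw [if_neg hgt]
      by_cases heq : l + 1 = st.1
      · rw [if_pos heq]
        refine ⟨?_, ?_, ?_⟩
        · rintro i' L (hi | ⟨rfl, hL⟩) hg
          · exact h1 i' L (Or.inl hi) hg
          · simp only
            omega
        · exact Or.inr (Or.inr ⟨heq ▸ hgood hq, by omega⟩)
        · have hbest : st.2 = pvCollect sv ps n i st.1 := by
            rw [h3, if_neg (by rintro ⟨_, hle⟩; omega), List.append_nil]
          simp only [hbest]
          rw [if_pos ⟨heq ▸ hgood hq, by omega⟩, heq]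
      · rw [if_neg heq]
        refine ⟨?_, ?_, ?_⟩
        · rintro i' L (hi | ⟨rfl, hL⟩) hg
          · exact h1 i' L (Or.inl hi) hg
          · omega
        · rcases h2 with h0 | hh | ⟨hg, hle⟩
          · exact Or.inl h0
          · exact Or.inr (Or.inl hh)
          · exact Or.inr (Or.inr ⟨hg, by omega⟩)
        · rw [h3]
          congr 1
          have hcond : (pvGoodB sv ps n i st.1 = true ∧ st.1 ≤ l + 1) ↔
              (pvGoodB sv ps n i st.1 = true ∧ st.1 ≤ l) := by
            constructor
            · rintro ⟨hg, hle⟩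
              exact ⟨hg, by omega⟩
            · rintro ⟨hg, hle⟩
              exact ⟨hg, by omega⟩
          rw [if_congr hcond rfl rfl]
  · rw [if_neg hq]
    have hng : pvGoodB sv ps n i (l + 1) = false := by
      rcases hgb : pvGoodB sv ps n i (l + 1) with _ | _
      · rfl
      · exact absurd (pvGoodB_iff.mp hgb).2.2.2 hq
    refine ⟨?_, ?_, ?_⟩
    · rintro i' L (hi | ⟨rfl, hL⟩) hg
      · exact h1 i' L (Or.inl hi) hg
      · rcases Or.symm (Nat.lt_or_ge l L) with hle | hgt2
        · exact h1 i' L (Or.inr ⟨rfl, hle⟩) hg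
        · have : L = l + 1 := by omega
          subst this
          rw [hng] at hg
          exact absurd hg (by simp)
    · rcases h2 with h0 | hh | ⟨hg, hle⟩
      · exact Or.inl h0
      · exact Or.inr (Or.inl hh)
      · exact Or.inr (Or.inr ⟨hg, by omega⟩)
    · rw [h3]
      congr 1
      have hcond : (pvGoodB sv ps n i st.1 = true ∧ st.1 ≤ l + 1) ↔
          (pvGoodB sv ps n i st.1 = true ∧ st.1 ≤ l) := by
        constructor
        · rintro ⟨hg, hle⟩
          rcases Or.symm (Nat.lt_or_ge l st.1) with h' | h'
          · exact ⟨hg, h'⟩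
          · have : st.1 = l + 1 := by omega
            rw [this] at hg
            rw [hng] at hg
            exact absurd hg (by simp)
        · rintro ⟨hg, hle⟩
          exact ⟨hg, by omega⟩
      rw [if_congr hcond rfl rfl]

lemma pvInnerB_inv (sv : Array Bool) (ps : List Int) (n : Int)
    (hpos : ∀ p ∈ ps, 0 < p) (i : Nat) :
    ∀ rem l st, (i + l) + rem = ps.length → pvInv2 sv ps n i l st →
      pvInv sv ps n (i + 1) (pvInnerB sv ps.toArray n i rem (i + l) (pvW ps i l) st) := by
  intro rem
  induction rem with
  | zero =>
    intro l st hsum h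
    simp only [pvInnerB]
    have hl : l = ps.length - i := by omega
    subst hl
    exact pvInv2_finish sv ps n i st h
  | succ rem ih =>
    intro l st hsum h
    simp only [pvInnerB]
    have hjlen : i + l < ps.length := by omega
    have hget : ps.toArray.getD (i + l) 0 = ps.getD (i + l) 0 := by
      rw [List.getD_eq_getElem ps 0 hjlen]
      simp [Array.getD, hjlen]
    have hsrec : pvW ps i l + ps.toArray.getD (i + l) 0 = pvW ps i (l + 1) := by
      rw [hget, pvW_succ ps i l hjlen]
    rw [hsrec]
    by_cases hge : pvW ps i (l + 1) ≥ n
    · rw [if_pos hge]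
      refine pvInv2_break sv ps n i l st ?_ h
      intro L hLl hLlen hWL
      have hmle : pvW ps i (l + 1) ≤ pvW ps i L := pvW_mono_len ps hpos i (by omega)
      omega
    · rw [if_neg hge]
      have hstep := pvInv2_step sv ps n i l st (by omega) (by omega) h
      simp only [pvQ] at hstep
      rw [show i + l - i + 1 = l + 1 by omega]
      have hres := ih (l + 1) _ (by omega) hstep
      rw [show i + (l + 1) = i + l + 1 by omega] at hres
      exact hres

lemma pvOuterB_inv (sv : Array Bool) (ps : List Int) (n : Int)
    (hpos : ∀ p ∈ ps, 0 < p) :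
    ∀ rem k st, k + rem = ps.length → pvInv sv ps n k st →
      pvInv sv ps n ps.length (pvOuterB sv ps.toArray n rem k st) := by
  intro rem
  induction rem with
  | zero =>
    intro k st hsum h
    simp only [pvOuterB]
    rw [show k = ps.length by omega] at h
    exact h
  | succ rem ih =>
    intro k st hsum h
    simp only [pvOuterB]
    apply ih (k + 1) _ (by omega)
    have h2 := pvInnerB_inv sv ps n hpos k (ps.length - k) 0 st (by omega)
      (pvInv2_zero sv ps n k st h)
    rw [List.size_toArray, show (0 : Int) = pvW ps k 0 by simp [pvW]]
    exact h2

lemma pvOuterA_eq (sv : Array Bool) (ps : List Int) (n : Int)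
    (hmono : ∀ a b : Nat, a < b → b < ps.length → ps.getD a 0 < ps.getD b 0)
    (bl : Nat) (best : List Int) (hInv : pvInv sv ps n ps.length (bl, best)) :
    ∀ L, L ≤ ps.length → (∀ i L', pvGoodB sv ps n i L' = true → L' ≤ L) →
      pvOuterA sv (pvPrefix ps) n ps.length L = PySem.List.sorted best (fun x => x) false := by
  intro L
  induction L with
  | zero =>
    intro hLT hmax
    obtain ⟨h1, h2, h3⟩ := hInv
    have hbl : bl = 0 := by
      rcases h2 with h0 | ⟨i0, hi0, hg⟩
      · exact h0
      · have := hmax i0 bl hg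
        omega
    subst hbl
    simp only at h3
    rw [pvCollect_zero] at h3
    subst h3
    simp only [pvOuterA]
    exact rfl
  | succ L ihL =>
    intro hLT hmax
    simp only [pvOuterA]
    rw [pvInnerA_eq_collect sv ps n hmono (L + 1) (by omega) hLT]
    by_cases hex : ∃ i0, pvGoodB sv ps n i0 (L + 1) = true
    · obtain ⟨i0, hg⟩ := hex
      have hi0 : i0 < ps.length := by
        have := (pvGoodB_iff.mp hg).2.1
        omega
      have hne := pvCollect_ne_nil sv ps n hi0 hg
      rw [if_neg (by simpa [List.isEmpty_iff] using hne)]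
      obtain ⟨h1, h2, h3⟩ := hInv
      have hble : bl = L + 1 := by
        have hub := h1 i0 (L + 1) hi0 hg
        rcases h2 with h0 | ⟨i1, _, hg1⟩
        · omega
        · have := hmax i1 bl hg1
          omega
      simp only at h3
      rw [h3, hble]
    · simp only [not_exists] at hex
      have hnil : pvCollect sv ps n ps.length (L + 1) = [] :=
        pvCollect_eq_nil sv ps n (fun i0 _ hgg => by exact absurd hgg (by simpa using hex i0))
      rw [hnil, if_pos (by simp)]
      apply ihL (by omega)
      intro i1 L' hg
      have hub := hmax i1 L' hg
      have hne : L' ≠ L + 1 := by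
        intro e
        exact absurd hg (by rw [e]; simpa using hex i1)
      omega

-- ===== VERDICT (by name: the statement is the Claim_ definition above) =====
lemma pvMain (n : Int) (sv : Array Bool) :
    pvOuterA sv (pvPrefix (pvPrimes n sv)) n (pvPrimes n sv).length (pvPrimes n sv).length
      = PySem.List.sorted
          (pvOuterB sv (pvPrimes n sv).toArray n (pvPrimes n sv).toArray.size 0 (0, [])).2
          (fun x => x) false := by
  set ps := pvPrimes n sv with hps
  have hpos : ∀ p ∈ ps, 0 < p := by
    intro p hp
    rw [hps, pvPrimes] at hp
    have hm := (List.mem_filter.mp hp).1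
    have := (PySem.List.mem_pyRange_one.mp hm).1
    omega
  have hpair : ps.Pairwise (· < ·) := by
    rw [hps, pvPrimes]
    exact List.Pairwise.filter _ (PySem.List.pairwise_lt_pyRange_one 2 n)
  have hmono : ∀ a b : Nat, a < b → b < ps.length → ps.getD a 0 < ps.getD b 0 := by
    intro a b hab hb
    have ha : a < ps.length := by omega
    rw [List.getD_eq_getElem _ _ ha, List.getD_eq_getElem _ _ hb]
    exact List.pairwise_iff_getElem.mp hpair a b ha hb hab
  have hinit : pvInv sv ps n 0 (0, []) := by
    refine ⟨fun i L h _ => absurd h (by omega), Or.inl rfl, ?_⟩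
    simp [pvCollect]
  have hInvT : pvInv sv ps n ps.length (pvOuterB sv ps.toArray n ps.length 0 (0, [])) :=
    pvOuterB_inv sv ps n hpos ps.length 0 (0, []) (by omega) hinit
  simp only [List.size_toArray]
  exact pvOuterA_eq sv ps n hmono (pvOuterB sv ps.toArray n ps.length 0 (0, [])).1
    (pvOuterB sv ps.toArray n ps.length 0 (0, [])).2 hInvT ps.length (le_refl _)
    (fun i L' hg => by
      have := (pvGoodB_iff.mp hg).2.1
      omega)

theorem prime_maxlength_chain_spec : Claim_equal_prime_maxlength_chain := by
  intro n _ _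
  unfold Spec_prime_maxlength_chain prime_maxlength_chain prime_maxlength_chain_alt
  exact pvMain n (pvSieve n)
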